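-- pv_equiv track=rewrite | github.com/google/personfinder | app/model.py | encode_count_name
-- ===== SOURCE A (Python) =====
-- def encode_count_name(count_name):
--     """Encode a name to printable ASCII characters so it can be safely
--     used as an attribute name for the datastore."""
--     encoded = []
--     append = encoded.append
--     for ch in map(ord, count_name):
--         if ch == 92:
--             append('\\\\')
--         elif 33 <= ch <= 126:
--             append(chr(ch))
--         else:
--             append('\\u%04x' % ch)
--     return ''.join(encoded)
-- ===== SOURCE B (Python) =====
-- import re
--
-- _ESCAPE_RE = re.compile(r'[^\x21-\x7e]|\\')
--
-- def _escape_match(m):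
--     ch = m.group()
--     return '\\\\' if ch == '\\' else '\\u%04x' % ord(ch)
--
-- def encode_count_name(count_name):
--     """Encode a name to printable ASCII characters so it can be safely
--     used as an attribute name for the datastore."""
--     return _ESCAPE_RE.sub(_escape_match, count_name)
-- ===== Notes on version B (the rewrite author's own statement) =====
-- stated objective: idiomatic
-- what changed: Replaced the explicit per-character loop with list accumulator and join by a single re.sub pass whose character class matches exactly the characters needing escapes, with a small callback producing the escape.
import Mathlib
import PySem

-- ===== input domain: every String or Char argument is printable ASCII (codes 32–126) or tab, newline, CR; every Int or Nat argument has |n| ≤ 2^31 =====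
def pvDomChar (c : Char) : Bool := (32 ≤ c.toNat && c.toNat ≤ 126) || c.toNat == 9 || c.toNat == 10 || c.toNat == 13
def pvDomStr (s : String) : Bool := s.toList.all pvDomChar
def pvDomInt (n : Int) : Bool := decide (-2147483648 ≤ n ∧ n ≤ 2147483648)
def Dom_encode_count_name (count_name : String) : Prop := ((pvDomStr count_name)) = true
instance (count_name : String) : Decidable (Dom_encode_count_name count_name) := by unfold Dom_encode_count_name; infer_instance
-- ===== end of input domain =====

-- B replaces A's per-character loop+accumulator with a single regex-substitution pass (idiomatic; same cost).


-- ===== PORT A =====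
-- '%04x' % ch : lowercase hex, left-padded with '0' to width 4 (exact for 0 ≤ ch; both ports format with it)
def pyHex4 (n : Nat) : String :=
  let d := Nat.toDigits 16 n
  String.mk (List.replicate (4 - d.length) '0' ++ d)

-- one iteration of A's for-loop: append the chosen piece to 'encoded'
def encodeStepA (encoded : List String) (c : Char) : List String :=
  let ch := c.toNat
  if ch == 92 then encoded ++ ["\\\\"]
  else if 33 ≤ ch ∧ ch ≤ 126 then encoded ++ [String.mk [Char.ofNat ch]]
  else encoded ++ ["\\u" ++ pyHex4 ch]

def encode_count_name (count_name : String) : String :=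
  String.join (count_name.toList.foldl encodeStepA [])

-- ===== PORT B =====
-- the compiled regex r'[^\x21-\x7e]|\\' : does it match this single character?
def escMatch (c : Char) : Bool := !(33 ≤ c.toNat && c.toNat ≤ 126) || c == '\\'

-- the substitution callback _escape_match
def escRepl (c : Char) : String :=
  if c == '\\' then "\\\\" else "\\u" ++ pyHex4 c.toNat

-- re.sub over the string: each matched (single-char) occurrence replaced by the callback's value,
-- unmatched characters copied through
def reSubEsc : List Char → String
  | [] => ""
  | c :: rest => (if escMatch c then escRepl c else String.mk [c]) ++ reSubEsc rest

def encode_count_name_alt (count_name : String) : String :=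
  reSubEsc count_name.toList

-- ===== PRECONDITION & SPEC =====
def Spec_encode_count_name (count_name : String) (out : String) : Prop := out = encode_count_name_alt count_name
instance (count_name : String) (out : String) : Decidable (Spec_encode_count_name count_name out) := by unfold Spec_encode_count_name; infer_instance

-- ===== CLAIM (what is proved, stated in full; the proofs are below) =====
def Claim_equal_encode_count_name : Prop := ∀ (count_name : String), Dom_encode_count_name count_name → Spec_encode_count_name count_name (encode_count_name count_name)

-- ===== LEMMAS AND PROOFS =====

-- A's per-character piece coincides with B's per-character substitution
theorem step_piece (c : Char) :
    encodeStepA [] c = [if escMatch c then escRepl c else String.mk [c]] := by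
  unfold encodeStepA escMatch escRepl
  by_cases h92 : c.toNat = 92
  · have hc : c = '\\' := by
      have hv : c.val.toNat = ('\\').val.toNat := by
        rw [show ('\\').val.toNat = 92 from rfl]; exact h92
      exact Char.ext (UInt32.toNat_inj.mp hv)
    subst hc; simp
  · have hc : ¬ c = '\\' := by
      intro h; subst h; simp [Char.toNat] at h92
    by_cases hr : 33 ≤ c.toNat ∧ c.toNat ≤ 126
    · simp [h92, hr, hc, Char.ofNat_toNat]
    · have hb : ¬ (33 ≤ c.toNat && c.toNat ≤ 126) = true := by
        simp only [Bool.and_eq_true, decide_eq_true_eq]; exact hr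
      simp [h92, hr, hc, hb]

theorem foldl_str (l : List String) (a : String) :
    List.foldl (fun r s => r ++ s) a l = a ++ List.foldl (fun r s => r ++ s) "" l := by
  induction l generalizing a with
  | nil => simp
  | cons x xs ih =>
    simp only [List.foldl_cons]
    rw [ih (a ++ x), ih ("" ++ x)]
    simp [String.append_assoc]

theorem join_append (a b : List String) :
    String.join (a ++ b) = String.join a ++ String.join b := by
  simp only [String.join, List.foldl_append]
  exact foldl_str b _

theorem step_acc (encoded : List String) (c : Char) :
    encodeStepA encoded c = encoded ++ encodeStepA [] c := by
  unfold encodeStepA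
  dsimp only
  split_ifs <;> simp

-- loop invariant: joining A's accumulator after the loop = join of the prefix ++ B's substitution of the rest
theorem foldl_join (l : List Char) (acc : List String) :
    String.join (l.foldl encodeStepA acc) = String.join acc ++ reSubEsc l := by
  induction l generalizing acc with
  | nil => simp [reSubEsc, String.join]
  | cons c rest ih =>
    rw [List.foldl_cons, ih, step_acc, step_piece, join_append]
    simp [String.join, String.append_assoc, reSubEsc]

-- ===== VERDICT (by name: the statement is the Claim_ definition above) =====
theorem encode_count_name_spec : Claim_equal_encode_count_name := by
  intro s _
  show _ = _
  unfold encode_count_name encode_count_name_alt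
  simpa [String.join] using foldl_join s.toList []
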